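-- pv_equiv track=rewrite | github.com/kergene/advent-code | 2020/code_day_11.py | find_stability
-- ===== SOURCE A (Python) =====
-- DIRECTIONS = (
--     (-1,-1),(-1,0),(-1,1),
--     (0,-1),        (0,1),
--     (1,-1), (1,0), (1,1)
-- )
--
-- def test_equality(data, new_data, n):
--     for i in range(n):
--         if new_data[i] != data[i]:
--             return False
--     return True
--
-- def find_stability(data):
--     n = len(data)
--     m = len(data[0])
--     stable = False
--     while not stable:
--         new_data = take_step(data, n, m)
--         stable = test_equality(data, new_data, n)
--         data = new_data
--     return sum(1 for row in data for element in row if element == '#')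
--
-- def take_step(data, n, m):
--     return [[replace_seat(x, y, data, n, m) for y in range(m)] for x in range(n)]
--
-- def replace_seat(x, y, data, n, m):
--     if data[x][y] == 'L':
--         for dx, dy in DIRECTIONS:
--             a,b = x+dx,y+dy
--             if 0 <= a < n and 0 <= b < m:
--                 if data[a][b] == '#':
--                     return 'L'
--         return '#'
--     elif data[x][y] == '#':
--         fulls = 0
--         for dx, dy in DIRECTIONS:
--             a,b = x+dx,y+dy
--             if 0 <= a < n and 0 <= b < m:
--                 if data[a][b] == '#':
--                     fulls += 1
--                     if fulls >= 4:
--                         return 'L'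
--         return '#'
--     else:
--         return data[x][y]
-- ===== SOURCE B (Python) =====
-- DELTAS = ((-1,-1),(-1,0),(-1,1),(0,-1),(0,1),(1,-1),(1,0),(1,1))
--
-- def find_stability(data):
--     n = len(data)
--     m = len(data[0])
--     grid = [[data[x][y] for y in range(m)] for x in range(n)]
--     counts = [[sum(1 for dx, dy in DELTAS
--                    if 0 <= x + dx < n and 0 <= y + dy < m and grid[x + dx][y + dy] == '#')
--                for y in range(m)] for x in range(n)]
--     while True:
--         flips = [(x, y) for x in range(n) for y in range(m)
--                  if (grid[x][y] == 'L' and counts[x][y] == 0)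
--                  or (grid[x][y] == '#' and counts[x][y] >= 4)]
--         if not flips:
--             break
--         for x, y in flips:
--             if grid[x][y] == '#':
--                 grid[x][y] = 'L'
--                 d = -1
--             else:
--                 grid[x][y] = '#'
--                 d = 1
--             for dx, dy in DELTAS:
--                 a, b = x + dx, y + dy
--                 if 0 <= a < n and 0 <= b < m:
--                     counts[a][b] += d
--     return sum(row.count('#') for row in grid)
-- ===== Notes on version B (the rewrite author's own statement) =====
-- stated objective: alternative
-- what changed: B maintains a per-cell occupied-neighbour count matrix incrementally instead of recomputing neighbourhoods: each round it reads the list of flipping seats off the counts, applies only those flips while patching the eight neighbouring counts by +/-1, and stops when the flip list is empty, replacing A's rebuild-the-whole-grid step with early-exit neighbour scans plus a separate full-grid equality pass.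
import Mathlib
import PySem

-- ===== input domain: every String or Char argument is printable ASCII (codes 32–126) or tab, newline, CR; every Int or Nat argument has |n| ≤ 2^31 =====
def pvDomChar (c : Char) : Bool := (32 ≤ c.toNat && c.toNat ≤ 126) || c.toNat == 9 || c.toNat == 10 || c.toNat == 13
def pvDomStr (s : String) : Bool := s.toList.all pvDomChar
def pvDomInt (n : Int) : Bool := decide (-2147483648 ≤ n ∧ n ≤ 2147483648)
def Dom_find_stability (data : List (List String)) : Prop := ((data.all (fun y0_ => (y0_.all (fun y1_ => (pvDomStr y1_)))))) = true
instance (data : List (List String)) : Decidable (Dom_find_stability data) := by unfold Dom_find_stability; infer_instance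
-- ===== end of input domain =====

-- B replaces A's rebuild-whole-grid-then-compare iteration by an incrementally maintained
-- neighbour-count matrix with sparse updates: each round reads the flip list off the counts,
-- applies only the flipped seats and patches the eight neighbouring counts by ±1, stopping
-- when the flip list is empty (objective: alternative algorithm, similar cost).

-- ===== PORT A =====
def pvDIRECTIONS : List (Int × Int) :=
  [(-1,-1),(-1,0),(-1,1),(0,-1),(0,1),(1,-1),(1,0),(1,1)]

-- data[x][y]; defaults are dead code under Pre_ (in-range accesses only)
def pvCellA (data : List (List String)) (x y : Int) : String :=
  PySem.List.pyGetD (PySem.List.pyGetD data x []) y ""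

-- the 'L'-branch for-loop of replace_seat (early return on an occupied neighbour)
def pvAnyAdj (x y : Int) (data : List (List String)) (n m : Int) : List (Int × Int) → Bool
  | [] => false
  | (dx, dy) :: rest =>
      if (0 ≤ x + dx ∧ x + dx < n) ∧ (0 ≤ y + dy ∧ y + dy < m) then
        if pvCellA data (x + dx) (y + dy) == "#" then true
        else pvAnyAdj x y data n m rest
      else pvAnyAdj x y data n m rest

-- the '#'-branch for-loop of replace_seat (counter with early return at 4)
def pvFulls (x y : Int) (data : List (List String)) (n m : Int) : List (Int × Int) → Int → String
  | [], _ => "#"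
  | (dx, dy) :: rest, fulls =>
      if (0 ≤ x + dx ∧ x + dx < n) ∧ (0 ≤ y + dy ∧ y + dy < m) then
        if pvCellA data (x + dx) (y + dy) == "#" then
          if 4 ≤ fulls + 1 then "L" else pvFulls x y data n m rest (fulls + 1)
        else pvFulls x y data n m rest fulls
      else pvFulls x y data n m rest fulls

def pvReplaceSeat (x y : Int) (data : List (List String)) (n m : Int) : String :=
  if pvCellA data x y == "L" then
    if pvAnyAdj x y data n m pvDIRECTIONS then "L" else "#"
  else if pvCellA data x y == "#" then
    pvFulls x y data n m pvDIRECTIONS 0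
  else pvCellA data x y

def pvTakeStep (data : List (List String)) (n m : Int) : List (List String) :=
  (PySem.List.pyRange 0 n 1).map (fun x =>
    (PySem.List.pyRange 0 m 1).map (fun y => pvReplaceSeat x y data n m))

def pvTestEqGo (data new_data : List (List String)) : List Int → Bool
  | [] => true
  | i :: rest =>
      if PySem.List.pyGet? new_data i ≠ PySem.List.pyGet? data i then false
      else pvTestEqGo data new_data rest

def pvTestEquality (data new_data : List (List String)) (n : Int) : Bool :=
  pvTestEqGo data new_data (PySem.List.pyRange 0 n 1)

def pvCountA (data : List (List String)) : Int :=
  data.foldl (fun acc row =>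
    row.foldl (fun acc e => if e == "#" then acc + 1 else acc) acc) 0

-- the while-loop; fuel bounds the iteration count: a deterministic orbit that ever reaches a
-- fixed point does so within the number of reachable grids (each cell stays in a ≤3-value set),
-- so 3^(n*m)+2 steps are never exhausted when the Python loop terminates
def pvLoopA (n m : Int) : Nat → List (List String) → Int
  | 0, data => pvCountA data
  | fuel + 1, data =>
      let new_data := pvTakeStep data n m
      if pvTestEquality data new_data n then pvCountA new_data
      else pvLoopA n m fuel new_data

def find_stability (data : List (List String)) : Int :=
  pvLoopA (data.length : Int) ((PySem.List.pyGetD data 0 []).length : Int)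
    (3 ^ (data.length * (PySem.List.pyGetD data 0 []).length) + 2) data

-- ===== PORT B =====  (pvDIRECTIONS and the cell accessor pvCellA are shared with port A)
-- counts[x][y]
def pvCntB (c : List (List Int)) (x y : Int) : Int :=
  PySem.List.pyGetD (PySem.List.pyGetD c x []) y 0

-- grid = [[data[x][y] for y in range(m)] for x in range(n)]
def pvGrid0 (data : List (List String)) (n m : Int) : List (List String) :=
  (PySem.List.pyRange 0 n 1).map (fun x =>
    (PySem.List.pyRange 0 m 1).map (fun y => pvCellA data x y))

def pvIndB (g : List (List String)) (n m p q : Int) : Bool :=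
  decide ((0 ≤ p ∧ p < n) ∧ (0 ≤ q ∧ q < m) ∧ pvCellA g p q = "#")

-- sum(1 for dx, dy in DELTAS if 0 <= x+dx < n and 0 <= y+dy < m and grid[x+dx][y+dy] == '#')
def pvCount8 (g : List (List String)) (n m x y : Int) : Int :=
  pvDIRECTIONS.foldl (fun s dd => if pvIndB g n m (x + dd.1) (y + dd.2) then s + 1 else s) 0

def pvCounts0 (g : List (List String)) (n m : Int) : List (List Int) :=
  (PySem.List.pyRange 0 n 1).map (fun x =>
    (PySem.List.pyRange 0 m 1).map (fun y => pvCount8 g n m x y))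

def pvFlipCondB (g : List (List String)) (c : List (List Int)) (x y : Int) : Bool :=
  decide ((pvCellA g x y = "L" ∧ pvCntB c x y = 0) ∨ (pvCellA g x y = "#" ∧ 4 ≤ pvCntB c x y))

-- flips = [(x, y) for x in range(n) for y in range(m) if …]
def pvFlips (g : List (List String)) (c : List (List Int)) (n m : Int) : List (Int × Int) :=
  (PySem.List.pyRange 0 n 1).foldl (fun acc x =>
    (PySem.List.pyRange 0 m 1).foldl (fun acc y =>
      if pvFlipCondB g c x y then acc ++ [(x, y)] else acc) acc) []

-- grid[x][y] = v  (indices are in range here, so pySetD is exact)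
def pvSet2 (g : List (List String)) (x y : Int) (v : String) : List (List String) :=
  PySem.List.pySetD g x (PySem.List.pySetD (PySem.List.pyGetD g x []) y v)

-- counts[x][y] += d
def pvMod2 (c : List (List Int)) (x y d : Int) : List (List Int) :=
  PySem.List.pySetD c x (PySem.List.pySetD (PySem.List.pyGetD c x []) y (pvCntB c x y + d))

-- the neighbour-count patch loop of one flip
def pvBump (c : List (List Int)) (x y d n m : Int) : List (List Int) :=
  pvDIRECTIONS.foldl (fun c dd =>
    if (0 ≤ x + dd.1 ∧ x + dd.1 < n) ∧ (0 ≤ y + dd.2 ∧ y + dd.2 < m) then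
      pvMod2 c (x + dd.1) (y + dd.2) d
    else c) c

-- the body of 'for x, y in flips'
def pvApply (n m : Int) (s : List (List String) × List (List Int)) (p : Int × Int) :
    List (List String) × List (List Int) :=
  if pvCellA s.1 p.1 p.2 == "#" then
    (pvSet2 s.1 p.1 p.2 "L", pvBump s.2 p.1 p.2 (-1) n m)
  else
    (pvSet2 s.1 p.1 p.2 "#", pvBump s.2 p.1 p.2 1 n m)

def pvCountB (grid : List (List String)) : Int :=
  (grid.map (fun row => (PySem.List.count row "#" : Int))).sum

-- the while-True loop; one fuel unit per round, same never-exhausted bound as A's loop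
-- (each of B's rounds is one synchronous automaton step)
def pvLoopB (n m : Int) : Nat → List (List String) → List (List Int) → Int
  | 0, grid, _ => pvCountB grid
  | fuel + 1, grid, counts =>
      let flips := pvFlips grid counts n m
      if flips = [] then pvCountB grid
      else
        let s := flips.foldl (pvApply n m) (grid, counts)
        pvLoopB n m fuel s.1 s.2

def find_stability_alt (data : List (List String)) : Int :=
  let grid := pvGrid0 data (data.length : Int) ((PySem.List.pyGetD data 0 []).length : Int)
  let counts := pvCounts0 grid (data.length : Int) ((PySem.List.pyGetD data 0 []).length : Int)
  pvLoopB (data.length : Int) ((PySem.List.pyGetD data 0 []).length : Int)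
    (3 ^ (data.length * (PySem.List.pyGetD data 0 []).length) + 2) grid counts

-- ===== PRECONDITION & SPEC =====
-- Pre_ excludes exactly the IndexError inputs: the empty grid (data[0] raises) and grids with a
-- row shorter than the first row (data[x][y] raises for some y < m); B raises there too.
def Pre_find_stability (data : List (List String)) : Prop :=
  data ≠ [] ∧ ∀ row ∈ data, (PySem.List.pyGetD data 0 []).length ≤ row.length
instance (data : List (List String)) : Decidable (Pre_find_stability data) := by
  unfold Pre_find_stability; infer_instance

def pvWitness_find_stability : List (List String) := [["L", "#"], [".", "L"]]

def Spec_find_stability (data : List (List String)) (out : Int) : Prop := out = find_stability_alt data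
instance (data : List (List String)) (out : Int) : Decidable (Spec_find_stability data out) := by
  unfold Spec_find_stability; infer_instance

-- ===== CLAIM (what is proved, stated in full; the proofs are below) =====
def Claim_equal_find_stability : Prop := ∀ (data : List (List String)), Dom_find_stability data → Pre_find_stability data → Spec_find_stability data (find_stability data)

-- ===== LEMMAS AND PROOFS =====

-- a rectangular n×m shape
def pvShape {α : Type} (n m : Int) (g : List (List α)) : Prop :=
  (g.length : Int) = n ∧ ∀ row ∈ g, (row.length : Int) = m

-- 0/1 indicator sums: the true neighbour count over a list of offsets
def pvInd (g : List (List String)) (n m p q : Int) : Int :=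
  if pvIndB g n m p q then 1 else 0

def pvSL (g : List (List String)) (n m x y : Int) (ds : List (Int × Int)) : Int :=
  (ds.map (fun d => pvInd g n m (x + d.1) (y + d.2))).sum

def pvS (g : List (List String)) (n m x y : Int) : Int := pvSL g n m x y pvDIRECTIONS

-- the uniform seat rule
def pvRule (c : String) (occ : Int) : String :=
  if c = "L" then (if 0 < occ then "L" else "#")
  else if c = "#" then (if 4 ≤ occ then "L" else "#")
  else c

-- the counts matrix tracks the true neighbour counts of the grid
def pvCInv (n m : Int) (g : List (List String)) (c : List (List Int)) : Prop :=
  ∀ x y : Int, 0 ≤ x → x < n → 0 ≤ y → y < m → pvCntB c x y = pvS g n m x y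

-- chebyshev-distance-1 offset test
def pvIsDelta (u v : Int) : Bool :=
  decide (-1 ≤ u ∧ u ≤ 1 ∧ -1 ≤ v ∧ v ≤ 1 ∧ ¬(u = 0 ∧ v = 0))

-- occupancy indicator of a single cell value
def pvHash (s : String) : Int := if s = "#" then 1 else 0

theorem pvInd_nonneg (g : List (List String)) (n m p q : Int) : 0 ≤ pvInd g n m p q := by
  unfold pvInd; split <;> norm_num

theorem pvSL_nonneg (g : List (List String)) (n m x y : Int) (ds : List (Int × Int)) :
    0 ≤ pvSL g n m x y ds := by
  induction ds with
  | nil => simp [pvSL]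
  | cons d rest ih =>
      have := pvInd_nonneg g n m (x + d.1) (y + d.2)
      simp only [pvSL, List.map_cons, List.sum_cons] at *
      omega

theorem pvInd_head (g : List (List String)) (n m x y dx dy : Int) :
    pvInd g n m (x + dx) (y + dy) =
      if (0 ≤ x + dx ∧ x + dx < n) ∧ (0 ≤ y + dy ∧ y + dy < m) then
        (if pvCellA g (x + dx) (y + dy) == "#" then 1 else 0)
      else 0 := by
  unfold pvInd pvIndB
  simp only [pvCellA, pvCellA, beq_iff_eq, decide_eq_true_eq]
  split_ifs <;> simp_all

theorem pvAnyAdjL_eq (x y : Int) (g : List (List String)) (n m : Int) (ds : List (Int × Int)) :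
    pvAnyAdj x y g n m ds = decide (0 < pvSL g n m x y ds) := by
  induction ds with
  | nil => simp [pvAnyAdj, pvSL]
  | cons d rest ih =>
      obtain ⟨dx, dy⟩ := d
      have hT := pvInd_head g n m x y dx dy
      have hSn := pvSL_nonneg g n m x y rest
      simp only [pvSL, List.map_cons, List.sum_cons] at hSn ⊢
      simp only [pvAnyAdj]
      by_cases hb : (0 ≤ x + dx ∧ x + dx < n) ∧ (0 ≤ y + dy ∧ y + dy < m)
      · rw [if_pos hb]
        by_cases hc : pvCellA g (x + dx) (y + dy) == "#"
        · rw [if_pos hc, eq_comm, decide_eq_true_iff, hT, if_pos hb, if_pos hc]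
          omega
        · rw [if_neg hc, ih]
          simp only [pvSL, hT, if_pos hb, if_neg hc, zero_add]
          rfl
      · rw [if_neg hb, ih]
        simp only [pvSL, hT, if_neg hb, zero_add]
        rfl

theorem pvFullsL_eq (x y : Int) (g : List (List String)) (n m : Int) (ds : List (Int × Int))
    (fulls : Int) (hf : fulls < 4) :
    pvFulls x y g n m ds fulls = if 4 ≤ fulls + pvSL g n m x y ds then "L" else "#" := by
  induction ds generalizing fulls with
  | nil => simp only [pvFulls, pvSL, List.map_nil, List.sum_nil]; rw [if_neg (by omega)]
  | cons d rest ih =>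
      obtain ⟨dx, dy⟩ := d
      have hT := pvInd_head g n m x y dx dy
      have hSn := pvSL_nonneg g n m x y rest
      simp only [pvSL, List.map_cons, List.sum_cons] at hSn ⊢
      simp only [pvFulls]
      by_cases hb : (0 ≤ x + dx ∧ x + dx < n) ∧ (0 ≤ y + dy ∧ y + dy < m)
      · rw [if_pos hb]
        by_cases hc : pvCellA g (x + dx) (y + dy) == "#"
        · rw [if_pos hc]
          simp only [pvSL, hT, if_pos hb, if_pos hc]
          by_cases h4 : (4:Int) ≤ fulls + 1
          · rw [if_pos h4, if_pos (by omega)]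
          · rw [if_neg h4, ih (fulls + 1) (by omega)]
            simp only [pvSL]
            split_ifs <;> first | rfl | (exfalso; omega)
        · rw [if_neg hc, ih fulls hf]
          simp only [pvSL, hT, if_pos hb, if_neg hc, zero_add]
          rfl
      · rw [if_neg hb, ih fulls hf]
        simp only [pvSL, hT, if_neg hb, zero_add]
        rfl

theorem pvReplace_eq (x y : Int) (g : List (List String)) (n m : Int) :
    pvReplaceSeat x y g n m = pvRule (pvCellA g x y) (pvS g n m x y) := by
  unfold pvReplaceSeat pvS
  rw [pvAnyAdjL_eq, pvFullsL_eq x y g n m _ 0 (by omega)]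
  have h04 : (4 ≤ 0 + pvSL g n m x y pvDIRECTIONS) ↔ 4 ≤ pvSL g n m x y pvDIRECTIONS := by
    omega
  by_cases hL : pvCellA g x y = "L"
  · simp [pvRule, hL]
  · by_cases hH : pvCellA g x y = "#"
    · simp [pvRule, hL, hH, h04]
    · simp [pvRule, hL, hH]

-- generic 2-d read of a 2-d write

theorem pvGetD2_set2 {α : Type} (g : List (List α)) (rd : List α) (d : α)
    {n m x y p q : Int} (hg : pvShape n m g)
    (hx0 : 0 ≤ x) (hx : x < n) (hy0 : 0 ≤ y) (hy : y < m) (v : α)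
    (hp0 : 0 ≤ p) (hp : p < n) (hq0 : 0 ≤ q) (hq : q < m) :
    PySem.List.pyGetD (PySem.List.pyGetD
        (PySem.List.pySetD g x (PySem.List.pySetD (PySem.List.pyGetD g x rd) y v)) p rd) q d
      = if p = x ∧ q = y then v
        else PySem.List.pyGetD (PySem.List.pyGetD g p rd) q d := by
  obtain ⟨hlen, hrows⟩ := hg
  have hxl : x < (g.length : Int) := by omega
  have hpl : p < (g.length : Int) := by omega
  have hrowx : (g[x.toNat]'(by omega)).length = m.toNat := by
    have := hrows (g[x.toNat]'(by omega)) (List.getElem_mem _)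
    omega
  rw [PySem.List.pySetD_of_nonneg _ _ hx0,
      PySem.List.pyGetD_eq_getElem _ rd hx0 hxl,
      PySem.List.pySetD_of_nonneg _ _ hy0,
      PySem.List.pyGetD_eq_getElem _ rd hp0 (by simpa using hpl)]
  rw [List.getElem_set]
  by_cases hpx : x.toNat = p.toNat
  · obtain rfl : p = x := by omega
    rw [if_pos hpx.symm]
    rw [PySem.List.pyGetD_eq_getElem _ d hq0 (by simp [hrowx]; omega)]
    rw [List.getElem_set]
    rw [PySem.List.pyGetD_eq_getElem g rd hx0 hxl,
        PySem.List.pyGetD_eq_getElem _ d hq0 (by simp [hrowx]; omega)]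
    by_cases hqy : y.toNat = q.toNat
    · obtain rfl : q = y := by omega
      rw [if_pos hqy.symm, if_pos ⟨rfl, rfl⟩]
    · have hqy' : ¬(q = y) := by omega
      rw [if_neg (fun h : y.toNat = q.toNat => hqy h), if_neg (by tauto)]
  · have hpx' : ¬(p = x) := by omega
    rw [if_neg hpx, if_neg (by tauto)]
    rw [PySem.List.pyGetD_eq_getElem g rd hp0 hpl]

theorem pvShape_set2 {α : Type} (g : List (List α)) (rd : List α)
    {n m x y : Int} (hg : pvShape n m g) (hx0 : 0 ≤ x) (hx : x < n) (v : α) :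
    pvShape n m (PySem.List.pySetD g x (PySem.List.pySetD (PySem.List.pyGetD g x rd) y v)) := by
  obtain ⟨hlen, hrows⟩ := hg
  rw [PySem.List.pySetD_of_nonneg _ _ hx0]
  constructor
  · simp [hlen]
  · intro row hrow
    rcases List.mem_or_eq_of_mem_set hrow with h | h
    · exact hrows row h
    · subst h
      rw [PySem.List.length_pySetD]
      have hxl : x < (g.length : Int) := by omega
      rw [PySem.List.pyGetD_eq_getElem _ rd hx0 hxl]
      exact hrows _ (List.getElem_mem _)

theorem pvCellA_set2 {n m : Int} {g : List (List String)} (hg : pvShape n m g)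
    {x y : Int} (hx0 : 0 ≤ x) (hx : x < n) (hy0 : 0 ≤ y) (hy : y < m) (v : String)
    {p q : Int} (hp0 : 0 ≤ p) (hp : p < n) (hq0 : 0 ≤ q) (hq : q < m) :
    pvCellA (pvSet2 g x y v) p q = if p = x ∧ q = y then v else pvCellA g p q :=
  pvGetD2_set2 g [] "" hg hx0 hx hy0 hy v hp0 hp hq0 hq

theorem pvCntB_mod2 {n m : Int} {c : List (List Int)} (hc : pvShape n m c)
    {x y : Int} (hx0 : 0 ≤ x) (hx : x < n) (hy0 : 0 ≤ y) (hy : y < m) (d : Int)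
    {p q : Int} (hp0 : 0 ≤ p) (hp : p < n) (hq0 : 0 ≤ q) (hq : q < m) :
    pvCntB (pvMod2 c x y d) p q = if p = x ∧ q = y then pvCntB c x y + d else pvCntB c p q :=
  pvGetD2_set2 c [] 0 hc hx0 hx hy0 hy _ hp0 hp hq0 hq

theorem countP_dirs_shift (x y a b : Int) :
    (List.countP (fun dd : Int × Int => decide (x + dd.1 = a ∧ y + dd.2 = b)) pvDIRECTIONS)
      = if pvIsDelta (a - x) (b - y) then 1 else 0 := by
  simp only [pvDIRECTIONS, List.countP_cons, List.countP_nil, decide_eq_true_eq, pvIsDelta]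
  split_ifs <;> omega

theorem pvIsDelta_symm (u v : Int) : pvIsDelta (-u) (-v) = pvIsDelta u v := by
  unfold pvIsDelta
  rw [decide_eq_decide]
  omega

theorem pvShape_mod2 {n m : Int} {c : List (List Int)} (hc : pvShape n m c)
    {x y : Int} (hx0 : 0 ≤ x) (hx : x < n) (d : Int) :
    pvShape n m (pvMod2 c x y d) :=
  pvShape_set2 c [] hc hx0 hx _

theorem pvBumpL (x y d n m : Int) (ds : List (Int × Int)) :
    ∀ (c : List (List Int)), pvShape n m c → ∀ {a b : Int},
      0 ≤ a → a < n → 0 ≤ b → b < m →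
      pvShape n m (ds.foldl (fun c dd =>
          if (0 ≤ x + dd.1 ∧ x + dd.1 < n) ∧ (0 ≤ y + dd.2 ∧ y + dd.2 < m) then
            pvMod2 c (x + dd.1) (y + dd.2) d
          else c) c) ∧
      pvCntB (ds.foldl (fun c dd =>
          if (0 ≤ x + dd.1 ∧ x + dd.1 < n) ∧ (0 ≤ y + dd.2 ∧ y + dd.2 < m) then
            pvMod2 c (x + dd.1) (y + dd.2) d
          else c) c) a b
        = pvCntB c a b
          + d * (List.countP (fun dd : Int × Int => decide (x + dd.1 = a ∧ y + dd.2 = b)) ds) := by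
  induction ds with
  | nil => intro c hc a b _ _ _ _; exact ⟨hc, by simp⟩
  | cons dd rest ih =>
      intro c hc a b ha0 ha hb0 hb
      simp only [List.foldl_cons, List.countP_cons]
      by_cases hg : (0 ≤ x + dd.1 ∧ x + dd.1 < n) ∧ (0 ≤ y + dd.2 ∧ y + dd.2 < m)
      · rw [if_pos hg]
        have hc' : pvShape n m (pvMod2 c (x + dd.1) (y + dd.2) d) := pvShape_mod2 hc hg.1.1 hg.1.2 d
        obtain ⟨hsh, hcnt⟩ := ih (pvMod2 c (x + dd.1) (y + dd.2) d) hc' ha0 ha hb0 hb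
        refine ⟨hsh, ?_⟩
        rw [hcnt, pvCntB_mod2 hc hg.1.1 hg.1.2 hg.2.1 hg.2.2 d ha0 ha hb0 hb]
        by_cases hit : x + dd.1 = a ∧ y + dd.2 = b
        · rw [if_pos ⟨hit.1.symm, hit.2.symm⟩, if_pos (by simpa using hit), hit.1, hit.2]
          push_cast
          ring
        · rw [if_neg (fun h => hit ⟨h.1.symm, h.2.symm⟩), if_neg (by simpa using hit)]
          push_cast
          ring
      · rw [if_neg hg]
        obtain ⟨hsh, hcnt⟩ := ih c hc ha0 ha hb0 hb
        refine ⟨hsh, ?_⟩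
        rw [hcnt]
        have hnohit : ¬(x + dd.1 = a ∧ y + dd.2 = b) := by
          intro h; exact hg ⟨⟨by omega, by omega⟩, ⟨by omega, by omega⟩⟩
        simp [hnohit]

theorem pvInd_set2 {n m : Int} {g : List (List String)} (hg : pvShape n m g)
    {x y : Int} (hx0 : 0 ≤ x) (hx : x < n) (hy0 : 0 ≤ y) (hy : y < m) (v : String)
    (p q : Int) :
    pvInd (pvSet2 g x y v) n m p q
      = pvInd g n m p q + (if p = x ∧ q = y then pvHash v - pvHash (pvCellA g x y) else 0) := by
  unfold pvInd pvIndB pvHash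
  simp only [decide_eq_true_eq]
  by_cases hb : (0 ≤ p ∧ p < n) ∧ (0 ≤ q ∧ q < m)
  · by_cases hpq : p = x ∧ q = y
    · have hcv : pvCellA (pvSet2 g x y v) p q = v := by
        rw [pvCellA_set2 hg hx0 hx hy0 hy v hb.1.1 hb.1.2 hb.2.1 hb.2.2, if_pos hpq]
      rw [hcv, if_pos hpq]
      obtain ⟨rfl, rfl⟩ := hpq
      split_ifs <;> simp_all <;> omega
    · have hcv : pvCellA (pvSet2 g x y v) p q = pvCellA g p q := by
        rw [pvCellA_set2 hg hx0 hx hy0 hy v hb.1.1 hb.1.2 hb.2.1 hb.2.2, if_neg hpq]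
      rw [hcv, if_neg hpq]
      simp
  · have hpq : ¬(p = x ∧ q = y) := by
      rintro ⟨rfl, rfl⟩; exact hb ⟨⟨hx0, hx⟩, hy0, hy⟩
    rw [if_neg hpq, if_neg (by tauto), if_neg (by tauto)]
    simp

theorem pvSL_set2 {n m : Int} {g : List (List String)} (hg : pvShape n m g)
    {x y : Int} (hx0 : 0 ≤ x) (hx : x < n) (hy0 : 0 ≤ y) (hy : y < m) (v : String)
    (a b : Int) (ds : List (Int × Int)) :
    pvSL (pvSet2 g x y v) n m a b ds
      = pvSL g n m a b ds
        + (pvHash v - pvHash (pvCellA g x y))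
          * (List.countP (fun dd : Int × Int => decide (a + dd.1 = x ∧ b + dd.2 = y)) ds) := by
  induction ds with
  | nil => simp [pvSL]
  | cons dd rest ih =>
      simp only [pvSL, List.map_cons, List.sum_cons, List.countP_cons] at ih ⊢
      rw [pvInd_set2 hg hx0 hx hy0 hy v, ih]
      by_cases hit : a + dd.1 = x ∧ b + dd.2 = y
      · rw [if_pos hit, if_pos (by simpa using hit)]
        push_cast
        ring
      · rw [if_neg hit, if_neg (by simpa using hit)]
        push_cast
        ring

theorem pvApply_eq (n m : Int) (g : List (List String)) (c : List (List Int)) (x y : Int) :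
    pvApply n m (g, c) (x, y)
      = (pvSet2 g x y (if pvCellA g x y = "#" then "L" else "#"),
         pvBump c x y (if pvCellA g x y = "#" then (-1) else 1) n m) := by
  unfold pvApply
  by_cases h : pvCellA g x y = "#" <;> simp [h]

theorem pvShape_bumpfold {n m x y d : Int} (ds : List (Int × Int)) :
    ∀ {c : List (List Int)}, pvShape n m c →
      pvShape n m (ds.foldl (fun c dd =>
        if (0 ≤ x + dd.1 ∧ x + dd.1 < n) ∧ (0 ≤ y + dd.2 ∧ y + dd.2 < m) then
          pvMod2 c (x + dd.1) (y + dd.2) d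
        else c) c) := by
  induction ds with
  | nil => intro c hc; exact hc
  | cons dd rest ih =>
      intro c hc
      simp only [List.foldl_cons]
      by_cases hgd : (0 ≤ x + dd.1 ∧ x + dd.1 < n) ∧ (0 ≤ y + dd.2 ∧ y + dd.2 < m)
      · rw [if_pos hgd]; exact ih (pvShape_mod2 hc hgd.1.1 hgd.1.2 d)
      · rw [if_neg hgd]; exact ih hc

theorem pvShape_bump {n m : Int} {c : List (List Int)} (hc : pvShape n m c) (x y d : Int) :
    pvShape n m (pvBump c x y d n m) :=
  pvShape_bumpfold pvDIRECTIONS hc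

theorem pvCInv_apply {n m : Int} {g : List (List String)} {c : List (List Int)}
    (hg : pvShape n m g) (hc : pvShape n m c) (hinv : pvCInv n m g c)
    {x y : Int} (hx0 : 0 ≤ x) (hx : x < n) (hy0 : 0 ≤ y) (hy : y < m) :
    pvCInv n m (pvSet2 g x y (if pvCellA g x y = "#" then "L" else "#"))
      (pvBump c x y (if pvCellA g x y = "#" then (-1) else 1) n m) := by
  intro a b ha0 ha hb0 hb
  set v : String := if pvCellA g x y = "#" then "L" else "#" with hv
  set d : Int := if pvCellA g x y = "#" then (-1) else 1 with hd
  have hδ : pvHash v - pvHash (pvCellA g x y) = d := by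
    rw [hv, hd]
    unfold pvHash
    by_cases h : pvCellA g x y = "#" <;> simp [h]
  have hbump := (pvBumpL x y d n m pvDIRECTIONS c hc ha0 ha hb0 hb).2
  unfold pvBump
  rw [hbump, hinv a b ha0 ha hb0 hb]
  show _ = pvS (pvSet2 g x y v) n m a b
  unfold pvS pvSL
  have hset := pvSL_set2 hg hx0 hx hy0 hy v a b pvDIRECTIONS
  unfold pvSL at hset
  rw [hset, hδ]
  rw [countP_dirs_shift x y a b, countP_dirs_shift a b x y]
  have e1 : x - a = -(a - x) := by ring
  have e2 : y - b = -(b - y) := by ring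
  rw [e1, e2, pvIsDelta_symm]

theorem pvFlips_eq (g : List (List String)) (c : List (List Int)) (n m : Int) :
    pvFlips g c n m
      = (PySem.List.pyRange 0 n 1).flatMap (fun x =>
          ((PySem.List.pyRange 0 m 1).filter (fun y => pvFlipCondB g c x y)).map
            (fun y => (x, y))) := by
  unfold pvFlips
  simp only [PySem.List.foldl_append_if]
  rw [PySem.List.foldl_append_eq_flatMap]
  simp

theorem pvFlips_mem (g : List (List String)) (c : List (List Int)) (n m x y : Int) :
    ((x, y) ∈ pvFlips g c n m)
      ↔ (0 ≤ x ∧ x < n ∧ 0 ≤ y ∧ y < m ∧ pvFlipCondB g c x y = true) := by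
  rw [pvFlips_eq]
  simp only [List.mem_flatMap, List.mem_map, List.mem_filter, PySem.List.mem_pyRange_one]
  constructor
  · rintro ⟨a, ⟨ha0, ha⟩, b, ⟨⟨hb0, hb⟩, hcond⟩, heq⟩
    obtain ⟨rfl, rfl⟩ := Prod.mk.injEq .. |>.mp heq.symm
    exact ⟨ha0, ha, hb0, hb, hcond⟩
  · rintro ⟨hx0, hx, hy0, hy, hcond⟩
    exact ⟨x, ⟨hx0, hx⟩, y, ⟨⟨hy0, hy⟩, hcond⟩, rfl⟩

theorem pvFlips_nodup (g : List (List String)) (c : List (List Int)) (n m : Int) :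
    (pvFlips g c n m).Nodup := by
  rw [pvFlips_eq, List.nodup_flatMap]
  constructor
  · intro x _
    exact ((PySem.List.nodup_pyRange_one 0 m).filter _).map
      (fun a b h => (Prod.mk.injEq .. |>.mp h).2)
  · refine (PySem.List.pairwise_lt_pyRange_one 0 n).imp ?_
    intro a b hab p hpa hpb
    simp only [List.mem_map, List.mem_filter] at hpa hpb
    obtain ⟨ya, _, rfl⟩ := hpa
    obtain ⟨yb, _, h⟩ := hpb
    have := (Prod.mk.injEq .. |>.mp h).1
    omega

theorem pvGetD2_getElem {α : Type} (g : List (List α)) (rd : List α) (d : α) (i j : Nat)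
    (hi : i < g.length) (hj : j < (g[i]'hi).length) :
    PySem.List.pyGetD (PySem.List.pyGetD g (i : Int) rd) (j : Int) d = (g[i]'hi)[j]'hj := by
  rw [PySem.List.pyGetD_eq_getElem g rd (by positivity) (by exact_mod_cast hi)]
  rw [PySem.List.pyGetD_eq_getElem _ d (by positivity) (by simpa using hj)]
  simp

theorem pvGrid_ext {n m : Int} {g h : List (List String)}
    (hg : pvShape n m g) (hh : pvShape n m h)
    (hcell : ∀ x y : Int, 0 ≤ x → x < n → 0 ≤ y → y < m → pvCellA g x y = pvCellA h x y) :
    g = h := by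
  have hlen : g.length = h.length := by
    have := hg.1; have := hh.1; omega
  apply List.ext_getElem hlen
  intro i h1 h2
  have hrl : (g[i]'h1).length = (h[i]'h2).length := by
    have e1 := hg.2 _ (List.getElem_mem h1)
    have e2 := hh.2 _ (List.getElem_mem h2)
    omega
  apply List.ext_getElem hrl
  intro j hj1 hj2
  have hx : (0:Int) ≤ i ∧ (i:Int) < n := by
    constructor; · positivity
    · have := hg.1; omega
  have hy : (0:Int) ≤ j ∧ (j:Int) < m := by
    constructor; · positivity
    · have := hg.2 _ (List.getElem_mem h1); omega
  have := hcell i j hx.1 hx.2 hy.1 hy.2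
  unfold pvCellA at this
  rw [pvGetD2_getElem g [] "" i j h1 hj1, pvGetD2_getElem h [] "" i j h2 hj2] at this
  exact this

theorem pvShape_rangeMap {α : Type} (f : Int → Int → α) (n m : Int) (hn : 0 ≤ n) (hm : 0 ≤ m) :
    pvShape n m ((PySem.List.pyRange 0 n 1).map (fun x =>
      (PySem.List.pyRange 0 m 1).map (fun y => f x y))) := by
  constructor
  · simp [PySem.List.length_pyRange_one]; omega
  · intro row hrow
    simp only [List.mem_map] at hrow
    obtain ⟨x, _, rfl⟩ := hrow
    simp [PySem.List.length_pyRange_one]; omega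

theorem pvGetD2_rangeMap {α : Type} (f : Int → Int → α) (rd : List α) (d : α)
    {n m x y : Int} (hx0 : 0 ≤ x) (hx : x < n) (hy0 : 0 ≤ y) (hy : y < m) :
    PySem.List.pyGetD (PySem.List.pyGetD
        ((PySem.List.pyRange 0 n 1).map (fun x =>
          (PySem.List.pyRange 0 m 1).map (fun y => f x y))) x rd) y d = f x y := by
  rw [PySem.List.pyGetD_map_pyRange_of_nonneg _ n x rd hx0 hx,
      PySem.List.pyGetD_map_pyRange_of_nonneg _ m y d hy0 hy]

theorem pvTestEqGo_true_iff (data new_data : List (List String)) :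
    ∀ L : List Int, pvTestEqGo data new_data L = true ↔
      ∀ i ∈ L, PySem.List.pyGet? new_data i = PySem.List.pyGet? data i := by
  intro L
  induction L with
  | nil => simp [pvTestEqGo]
  | cons a rest ih =>
      simp only [pvTestEqGo]
      by_cases h : PySem.List.pyGet? new_data a = PySem.List.pyGet? data a
      · simp [h, ih]
      · simp [h]

theorem pvTestEqGo_refl (data : List (List String)) (L : List Int) :
    pvTestEqGo data data L = true := by
  rw [pvTestEqGo_true_iff]
  intro i _; rfl

theorem pvTest_cells {n m : Int} {data h : List (List String)}
    (hlen : (data.length : Int) = n) (hh : pvShape n m h)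
    (ht : pvTestEquality data h n = true) :
    ∀ x y : Int, 0 ≤ x → x < n → pvCellA h x y = pvCellA data x y := by
  intro x y hx0 hx
  have hrow := (pvTestEqGo_true_iff data h _).mp ht x
    (by rw [PySem.List.mem_pyRange_one]; exact ⟨hx0, hx⟩)
  rw [PySem.List.pyGet?_eq_some_getElem h hx0 (by rw [hh.1]; exact hx),
      PySem.List.pyGet?_eq_some_getElem data hx0 (by rw [hlen]; exact hx)] at hrow
  have hr := Option.some.injEq .. |>.mp hrow
  unfold pvCellA
  rw [PySem.List.pyGetD_eq_getElem h [] hx0 (by rw [hh.1]; exact hx),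
      PySem.List.pyGetD_eq_getElem data [] hx0 (by rw [hlen]; exact hx), hr]

theorem pvCountA_go (rows : List (List String)) :
    ∀ acc : Int,
      rows.foldl (fun acc row =>
          row.foldl (fun acc e => if e == "#" then acc + 1 else acc) acc) acc
        = acc + (rows.map (fun row => (PySem.List.count row "#" : Int))).sum := by
  induction rows with
  | nil => intro acc; simp
  | cons r rest ih =>
      intro acc
      simp only [List.foldl_cons, List.map_cons, List.sum_cons]
      rw [PySem.List.foldl_beq_add_one, ih, PySem.List.count_eq]
      ring

theorem pvCount_eq (d : List (List String)) : pvCountA d = pvCountB d := by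
  unfold pvCountA pvCountB
  rw [pvCountA_go]
  ring

theorem pvLoopA_fixed {n m : Int} {g : List (List String)}
    (hfix : pvTakeStep g n m = g) : ∀ fuel, pvLoopA n m fuel g = pvCountA g := by
  intro fuel
  cases fuel with
  | zero => rfl
  | succ f =>
      simp only [pvLoopA]
      rw [hfix, pvTestEquality, pvTestEqGo_refl]
      simp

-- with the counts invariant, the flip condition says exactly 'this seat changes'

theorem pvFlipCondB_iff {n m : Int} {g : List (List String)} {c : List (List Int)}
    (hinv : pvCInv n m g c) {x y : Int}
    (hx0 : 0 ≤ x) (hx : x < n) (hy0 : 0 ≤ y) (hy : y < m) :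
    pvFlipCondB g c x y = true
      ↔ pvRule (pvCellA g x y) (pvS g n m x y) ≠ pvCellA g x y := by
  unfold pvFlipCondB pvRule
  rw [hinv x y hx0 hx hy0 hy, decide_eq_true_eq]
  have hS0 : 0 ≤ pvS g n m x y := pvSL_nonneg g n m x y pvDIRECTIONS
  by_cases hL : pvCellA g x y = "L"
  · rw [hL]
    by_cases h0 : pvS g n m x y = 0
    · simp [h0]
    · have : (0:Int) < pvS g n m x y := by omega
      simp [h0, this]
  · by_cases hH : pvCellA g x y = "#"
    · rw [hH]
      by_cases h4 : (4:Int) ≤ pvS g n m x y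
      · simp [h4, hL, hH]
      · simp [h4, hL, hH]
    · simp [hL, hH]

theorem pvRule_toggle {n m : Int} {g : List (List String)} {c : List (List Int)}
    (hinv : pvCInv n m g c) {x y : Int}
    (hx0 : 0 ≤ x) (hx : x < n) (hy0 : 0 ≤ y) (hy : y < m)
    (hcond : pvFlipCondB g c x y = true) :
    pvRule (pvCellA g x y) (pvS g n m x y)
      = (if pvCellA g x y = "#" then "L" else "#") := by
  unfold pvFlipCondB at hcond
  rw [hinv x y hx0 hx hy0 hy, decide_eq_true_eq] at hcond
  unfold pvRule
  rcases hcond with ⟨hL, h0⟩ | ⟨hH, h4⟩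
  · rw [hL, h0]
    simp
  · rw [hH]
    simp [h4]

-- processing the flip list cell by cell: each flip toggles its own seat to the intended
-- value F and keeps the counts matrix in sync with the evolving grid

theorem pvTakeStep_cell {g : List (List String)} {n m x y : Int}
    (hx0 : 0 ≤ x) (hx : x < n) (hy0 : 0 ≤ y) (hy : y < m) :
    pvCellA (pvTakeStep g n m) x y = pvReplaceSeat x y g n m := by
  unfold pvCellA pvTakeStep
  exact pvGetD2_rangeMap (fun x y => pvReplaceSeat x y g n m) [] "" hx0 hx hy0 hy

theorem pvFoldApply {n m : Int} (F : Int → Int → String) :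
    ∀ (R : List (Int × Int)) (g : List (List String)) (c : List (List Int)),
      pvShape n m g → pvShape n m c → pvCInv n m g c → R.Nodup →
      (∀ p ∈ R, 0 ≤ p.1 ∧ p.1 < n ∧ 0 ≤ p.2 ∧ p.2 < m ∧
        F p.1 p.2 = (if pvCellA g p.1 p.2 = "#" then "L" else "#")) →
      (∀ x y : Int, 0 ≤ x → x < n → 0 ≤ y → y < m → (x, y) ∉ R → pvCellA g x y = F x y) →
      pvShape n m (R.foldl (pvApply n m) (g, c)).1 ∧
      pvShape n m (R.foldl (pvApply n m) (g, c)).2 ∧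
      pvCInv n m (R.foldl (pvApply n m) (g, c)).1 (R.foldl (pvApply n m) (g, c)).2 ∧
      (∀ x y : Int, 0 ≤ x → x < n → 0 ≤ y → y < m →
        pvCellA (R.foldl (pvApply n m) (g, c)).1 x y = F x y) := by
  intro R
  induction R with
  | nil =>
      intro g c hg hc hinv _ _ hout
      refine ⟨hg, hc, hinv, fun x y hx0 hx hy0 hy => ?_⟩
      simp only [List.foldl_nil]
      exact hout x y hx0 hx hy0 hy List.not_mem_nil
  | cons p R' ih =>
      intro g c hg hc hinv hnd hin hout
      obtain ⟨px, py⟩ := p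
      obtain ⟨hpx0, hpx, hpy0, hpy, hFp⟩ := hin (px, py) List.mem_cons_self
      have hpR' : (px, py) ∉ R' := (List.nodup_cons.mp hnd).1
      simp only [List.foldl_cons, pvApply_eq]
      set v : String := if pvCellA g px py = "#" then "L" else "#" with hv
      set d : Int := if pvCellA g px py = "#" then (-1) else 1 with hd
      have hg1 : pvShape n m (pvSet2 g px py v) := pvShape_set2 g [] hg hpx0 hpx v
      have hc1 : pvShape n m (pvBump c px py d n m) := pvShape_bump hc px py d
      have hinv1 : pvCInv n m (pvSet2 g px py v) (pvBump c px py d n m) :=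
        pvCInv_apply hg hc hinv hpx0 hpx hpy0 hpy
      refine ih (pvSet2 g px py v) (pvBump c px py d n m) hg1 hc1 hinv1
        (List.nodup_cons.mp hnd).2 ?_ ?_
      · intro q hq
        obtain ⟨hq1, hq2, hq3, hq4, hFq⟩ := hin q (List.mem_cons_of_mem _ hq)
        refine ⟨hq1, hq2, hq3, hq4, ?_⟩
        have hne : ¬(q.1 = px ∧ q.2 = py) := by
          rintro ⟨h1, h2⟩
          exact hpR' (by rw [← h1, ← h2]; exact hq)
        rw [pvCellA_set2 hg hpx0 hpx hpy0 hpy v hq1 hq2 hq3 hq4, if_neg hne]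
        exact hFq
      · intro x y hx0 hx hy0 hy hnot
        rw [pvCellA_set2 hg hpx0 hpx hpy0 hpy v hx0 hx hy0 hy]
        by_cases hpq : x = px ∧ y = py
        · rw [if_pos hpq, hpq.1, hpq.2, hFp]
        · rw [if_neg hpq]
          refine hout x y hx0 hx hy0 hy ?_
          intro hmem
          rcases List.mem_cons.mp hmem with heq | hmem'
          · exact hpq ⟨(Prod.mk.injEq .. |>.mp heq).1, (Prod.mk.injEq .. |>.mp heq).2⟩
          · exact hnot hmem'

-- one whole iteration: applying the flip list turns the grid into A's take_step and keeps
-- the counts invariant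

theorem pvStep_main {n m : Int} {g : List (List String)} {c : List (List Int)}
    (hn : 0 ≤ n) (hm : 0 ≤ m)
    (hg : pvShape n m g) (hc : pvShape n m c) (hinv : pvCInv n m g c) :
    ((pvFlips g c n m).foldl (pvApply n m) (g, c)).1 = pvTakeStep g n m ∧
    pvShape n m ((pvFlips g c n m).foldl (pvApply n m) (g, c)).2 ∧
    pvCInv n m ((pvFlips g c n m).foldl (pvApply n m) (g, c)).1
      ((pvFlips g c n m).foldl (pvApply n m) (g, c)).2 := by
  have hmain := pvFoldApply (fun x y => pvReplaceSeat x y g n m) (pvFlips g c n m) g c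
    hg hc hinv (pvFlips_nodup g c n m) ?_ ?_
  · obtain ⟨hsh1, hsh2, hinv', hcells⟩ := hmain
    have hts : pvShape n m (pvTakeStep g n m) := pvShape_rangeMap _ n m hn hm
    have heq : ((pvFlips g c n m).foldl (pvApply n m) (g, c)).1 = pvTakeStep g n m := by
      refine pvGrid_ext hsh1 hts ?_
      intro x y hx0 hx hy0 hy
      rw [hcells x y hx0 hx hy0 hy]
      show pvReplaceSeat x y g n m = pvCellA (pvTakeStep g n m) x y
      exact (pvTakeStep_cell hx0 hx hy0 hy).symm
    exact ⟨heq, hsh2, hinv'⟩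
  · intro p hp
    obtain ⟨px, py⟩ := p
    obtain ⟨h1, h2, h3, h4, hcond⟩ := (pvFlips_mem g c n m px py).mp hp
    refine ⟨h1, h2, h3, h4, ?_⟩
    show pvReplaceSeat px py g n m = _
    rw [pvReplace_eq]
    exact pvRule_toggle hinv h1 h2 h3 h4 hcond
  · intro x y hx0 hx hy0 hy hnot
    have hcond : ¬(pvFlipCondB g c x y = true) := by
      intro hcond
      exact hnot ((pvFlips_mem g c n m x y).mpr ⟨hx0, hx, hy0, hy, hcond⟩)
    show pvCellA g x y = pvReplaceSeat x y g n m
    rw [pvReplace_eq]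
    by_contra hne
    exact hcond ((pvFlipCondB_iff hinv hx0 hx hy0 hy).mpr (fun h => hne h.symm))

theorem pvFlips_empty_iff {n m : Int} {g : List (List String)} {c : List (List Int)}
    (hn : 0 ≤ n) (hm : 0 ≤ m)
    (hg : pvShape n m g) (hc : pvShape n m c) (hinv : pvCInv n m g c) :
    pvFlips g c n m = [] ↔ pvTakeStep g n m = g := by
  constructor
  · intro hemp
    refine pvGrid_ext (pvShape_rangeMap _ n m hn hm) hg ?_
    intro x y hx0 hx hy0 hy
    have hnot : (x, y) ∉ pvFlips g c n m := by rw [hemp]; exact List.not_mem_nil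
    have hcond : ¬(pvFlipCondB g c x y = true) := by
      intro hcond
      exact hnot ((pvFlips_mem g c n m x y).mpr ⟨hx0, hx, hy0, hy, hcond⟩)
    have hrule : pvRule (pvCellA g x y) (pvS g n m x y) = pvCellA g x y := by
      by_contra hne
      exact hcond ((pvFlipCondB_iff hinv hx0 hx hy0 hy).mpr hne)
    show pvCellA (pvTakeStep g n m) x y = pvCellA g x y
    rw [pvTakeStep_cell hx0 hx hy0 hy, pvReplace_eq]
    exact hrule
  · intro hfix
    rw [List.eq_nil_iff_forall_not_mem]
    rintro ⟨x, y⟩ hmem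
    obtain ⟨hx0, hx, hy0, hy, hcond⟩ := (pvFlips_mem g c n m x y).mp hmem
    have hrule := (pvFlipCondB_iff hinv hx0 hx hy0 hy).mp hcond
    refine hrule ?_
    have h2 : pvCellA (pvTakeStep g n m) x y = pvCellA g x y := by rw [hfix]
    rw [pvTakeStep_cell hx0 hx hy0 hy, pvReplace_eq] at h2
    exact h2

theorem pvS_congr {g1 g2 : List (List String)} {n m : Int}
    (hagree : ∀ a b : Int, 0 ≤ a → a < n → 0 ≤ b → b < m → pvCellA g1 a b = pvCellA g2 a b)
    (x y : Int) : pvS g1 n m x y = pvS g2 n m x y := by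
  unfold pvS pvSL
  congr 1
  apply List.map_congr_left
  intro d _
  unfold pvInd pvIndB
  by_cases hb : (0 ≤ x + d.1 ∧ x + d.1 < n) ∧ (0 ≤ y + d.2 ∧ y + d.2 < m)
  · rw [hagree (x + d.1) (y + d.2) hb.1.1 hb.1.2 hb.2.1 hb.2.2]
  · rw [if_neg (by simpa using fun h1 h2 _ => hb ⟨h1, h2⟩),
        if_neg (by simpa using fun h1 h2 _ => hb ⟨h1, h2⟩)]

theorem pvTakeStep_congr {g1 g2 : List (List String)} {n m : Int}
    (hagree : ∀ a b : Int, 0 ≤ a → a < n → 0 ≤ b → b < m → pvCellA g1 a b = pvCellA g2 a b) :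
    pvTakeStep g1 n m = pvTakeStep g2 n m := by
  unfold pvTakeStep
  apply List.map_congr_left
  intro x hx
  rw [PySem.List.mem_pyRange_one] at hx
  apply List.map_congr_left
  intro y hy
  rw [PySem.List.mem_pyRange_one] at hy
  rw [pvReplace_eq, pvReplace_eq,       hagree x y hx.1 hx.2 hy.1 hy.2, pvS_congr hagree]

-- fuel-aligned loops: with the counts invariant, B's flip-list loop computes A's loop

theorem pvLoop_eq {n m : Int} (hn : 0 ≤ n) (hm : 0 ≤ m) :
    ∀ (fuel : Nat) (g : List (List String)) (c : List (List Int)),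
      pvShape n m g → pvShape n m c → pvCInv n m g c →
      pvLoopA n m fuel g = pvLoopB n m fuel g c := by
  intro fuel
  induction fuel with
  | zero => intro g c _ _ _; exact pvCount_eq g
  | succ f ih =>
      intro g c hg hc hinv
      simp only [pvLoopA, pvLoopB]
      by_cases hemp : pvFlips g c n m = []
      · rw [if_pos hemp]
        have hfix := (pvFlips_empty_iff hn hm hg hc hinv).mp hemp
        rw [hfix, pvTestEquality, pvTestEqGo_refl]
        simp only [if_true]
        exact pvCount_eq g
      · rw [if_neg hemp]
        obtain ⟨hfst, hsh2, hinv'⟩ := pvStep_main hn hm hg hc hinv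
        have hts : pvShape n m (pvTakeStep g n m) := pvShape_rangeMap _ n m hn hm
        have htfalse : pvTestEquality g (pvTakeStep g n m) n = false := by
          rw [Bool.eq_false_iff]
          intro htrue
          apply hemp
          rw [pvFlips_empty_iff hn hm hg hc hinv]
          refine pvGrid_ext hts hg ?_
          intro x y hx0 hx hy0 hy
          exact pvTest_cells hg.1 hts htrue x y hx0 hx
        rw [htfalse]
        simp only [Bool.false_eq_true, if_false]
        rw [← hfst]
        exact ih _ _ (by rw [hfst]; exact hts) hsh2 hinv'

theorem pvCount8_eq_S (g : List (List String)) (n m x y : Int) :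
    pvCount8 g n m x y = pvS g n m x y := by
  unfold pvCount8 pvS pvSL pvInd
  rw [
    PySem.List.foldl_count_if (fun dd : Int × Int => pvIndB g n m (x + dd.1) (y + dd.2))
      pvDIRECTIONS 0,
    PySem.List.sum_map_ite_one_zero (fun dd : Int × Int => pvIndB g n m (x + dd.1) (y + dd.2))
      pvDIRECTIONS]
  ring

theorem pvMain (data : List (List String)) (hne : data ≠ [])
    (_hrows : ∀ row ∈ data, (PySem.List.pyGetD data 0 []).length ≤ row.length) :
    find_stability data = find_stability_alt data := by
  unfold find_stability find_stability_alt
  set n : Int := (data.length : Int) with hn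
  set m : Int := ((PySem.List.pyGetD data 0 []).length : Int) with hm
  have hn0 : 0 < n := by
    rw [hn]
    exact_mod_cast List.length_pos_iff.mpr hne
  have hm0 : 0 ≤ m := by rw [hm]; positivity
  set g0 : List (List String) := pvGrid0 data n m with hg0def
  have hg0 : pvShape n m g0 := pvShape_rangeMap _ n m (le_of_lt hn0) hm0
  have hcell0 : ∀ a b : Int, 0 ≤ a → a < n → 0 ≤ b → b < m →
      pvCellA g0 a b = pvCellA data a b := by
    intro a b ha0 ha hb0 hb
    rw [hg0def]
    unfold pvCellA pvGrid0
    exact pvGetD2_rangeMap (fun x y => PySem.List.pyGetD (PySem.List.pyGetD data x []) y "")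
      [] "" ha0 ha hb0 hb
  set c0 : List (List Int) := pvCounts0 g0 n m with hc0def
  have hc0 : pvShape n m c0 := pvShape_rangeMap _ n m (le_of_lt hn0) hm0
  have hinv0 : pvCInv n m g0 c0 := by
    intro x y hx0 hx hy0 hy
    show pvCntB c0 x y = pvS g0 n m x y
    rw [hc0def]
    unfold pvCntB pvCounts0
    rw [pvGetD2_rangeMap (fun x y => pvCount8 g0 n m x y) [] 0 hx0 hx hy0 hy]
    exact pvCount8_eq_S g0 n m x y
  obtain ⟨f, hf⟩ : ∃ f, 3 ^ (data.length * (PySem.List.pyGetD data 0 []).length) + 2 = f + 1 :=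
    ⟨3 ^ (data.length * (PySem.List.pyGetD data 0 []).length) + 1, by omega⟩
  rw [hf]
  simp only [pvLoopA, pvLoopB]
  have hstep : pvTakeStep data n m = pvTakeStep g0 n m :=
    pvTakeStep_congr (fun a b ha0 ha hb0 hb => (hcell0 a b ha0 ha hb0 hb).symm)
  rw [hstep]
  by_cases hemp : pvFlips g0 c0 n m = []
  · rw [if_pos hemp]
    have hfix := (pvFlips_empty_iff (le_of_lt hn0) hm0 hg0 hc0 hinv0).mp hemp
    rw [hfix]
    by_cases ht : pvTestEquality data g0 n = true
    · rw [if_pos ht]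
      exact pvCount_eq g0
    · rw [if_neg (by simpa using ht)]
      rw [pvLoopA_fixed hfix f]
      exact pvCount_eq g0
  · rw [if_neg hemp]
    obtain ⟨hfst, hsh2, hinv'⟩ := pvStep_main (le_of_lt hn0) hm0 hg0 hc0 hinv0
    have hts : pvShape n m (pvTakeStep g0 n m) := pvShape_rangeMap _ n m (le_of_lt hn0) hm0
    have htf : pvTestEquality data (pvTakeStep g0 n m) n = false := by
      rw [Bool.eq_false_iff]
      intro htrue
      apply hemp
      rw [pvFlips_empty_iff (le_of_lt hn0) hm0 hg0 hc0 hinv0]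
      refine pvGrid_ext hts hg0 ?_
      intro x y hx0 hx hy0 hy
      rw [pvTest_cells hn.symm hts htrue x y hx0 hx]
      exact (hcell0 x y hx0 hx hy0 hy).symm
    rw [htf]
    simp only [Bool.false_eq_true, if_false]
    rw [← hfst]
    exact pvLoop_eq (le_of_lt hn0) hm0 f _ _ (by rw [hfst]; exact hts) hsh2 hinv'

-- ===== VERDICT (by name: the statement is the Claim_ definition above) =====
theorem find_stability_spec : Claim_equal_find_stability := by
  intro data _ hpre
  show find_stability data = find_stability_alt data
  exact pvMain data hpre.1 hpre.2
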